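-- pv_equiv track=rewrite | github.com/adimineman/1bitvm | gates.py | ident
-- ===== SOURCE A (Python) =====
-- def ident(n: int) -> list:
--     return [
--         int(
--             "".join("1" if ((x // (2**a)) % 2) == 0 else "0" for x in range(2**n)),
--             2,
--         )
--         for a in range(0, n)
--     ]
-- ===== SOURCE B (Python) =====
-- def ident(n: int) -> list:
--     out = []
--     for a in range(n):
--         p = 2 ** a
--         # one period of row a: 2**a one-bits then 2**a zero-bits
--         row = ((1 << p) - 1) << p
--         width = 2 * p
--         # double the tile n-a-1 times to reach the full 2**n-bit row
--         for _ in range(n - a - 1):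
--             row = (row << width) + row
--             width *= 2
--         out.append(row)
--     return out
-- ===== Notes on version B (the rewrite author's own statement) =====
-- stated objective: alternative
-- what changed: B never builds or parses the 2^n-character bit string: it constructs one period of each row directly as an integer (a block of one-bits followed by a block of zero-bits) and doubles the tile with shift-and-add until the row is full, instead of A's per-bit-position generator joined into a string and re-parsed in base two.
import Mathlib
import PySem

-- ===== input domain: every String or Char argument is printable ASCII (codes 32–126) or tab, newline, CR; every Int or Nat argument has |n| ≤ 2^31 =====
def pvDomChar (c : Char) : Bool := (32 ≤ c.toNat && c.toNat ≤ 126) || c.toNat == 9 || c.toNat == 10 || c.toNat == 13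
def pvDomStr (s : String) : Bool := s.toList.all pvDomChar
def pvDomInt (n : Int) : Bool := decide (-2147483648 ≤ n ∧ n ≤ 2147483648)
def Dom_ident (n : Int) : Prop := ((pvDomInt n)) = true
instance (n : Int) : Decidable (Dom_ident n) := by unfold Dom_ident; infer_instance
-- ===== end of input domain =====

-- B builds each row by integer tiling (one period, then shift-and-add doubling) instead of
-- A's join of 2^n one-character strings re-parsed in base two.


-- ===== PORT A =====
-- int(s, 2) ported by hand as the base-2 left fold; exact for every string this port feeds it:
-- nonempty (first char is the bit of x = 0, i.e. '1') and made only of '0'/'1', so Python's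
-- int(s, 2) has no whitespace/sign/'0b' prefix/underscore handling to do and is exactly this fold.
def pvIntBase2 (s : String) : Int :=
  s.toList.foldl (fun acc c => 2 * acc + (if c = '1' then 1 else 0)) 0

def ident (n : Int) : List Int :=
  (PySem.List.pyRange 0 n 1).map (fun a =>
    pvIntBase2 (PySem.Str.join ""
      ((PySem.List.pyRange 0 ((2:Int) ^ n.toNat) 1).map
        (fun x =>
          if PySem.Int.mod (PySem.Int.floordiv x ((2:Int) ^ a.toNat)) 2 = 0 then "1" else "0"))))

-- ===== PORT B =====
-- Source B: for a in range(n): one period (2**a ones then 2**a zeros) as an integer, then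
-- n-a-1 shift-and-add doublings; rows collected with out.append.
def ident_alt (n : Int) : List Int :=
  (PySem.List.pyRange 0 n 1).foldl (fun out a =>
    let p : Int := (2:Int) ^ a.toNat
    let row : Int := (((1:Int) <<< p.toNat) - 1) <<< p.toNat
    let st : Int × Int :=
      (List.range (n - a - 1).toNat).foldl
        (fun (s : Int × Int) _ => (s.1 <<< s.2.toNat + s.1, 2 * s.2)) (row, 2 * p)
    out ++ [st.1]) []

-- ===== PRECONDITION & SPEC =====
def Spec_ident (n : Int) (out : List Int) : Prop := out = ident_alt n
instance (n : Int) (out : List Int) : Decidable (Spec_ident n out) := by unfold Spec_ident; infer_instance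

-- ===== CLAIM (what is proved, stated in full; the proofs are below) =====
def Claim_equal_ident : Prop := ∀ (n : Int), Dom_ident n → Spec_ident n (ident n)

-- ===== LEMMAS AND PROOFS =====

-- the bit A writes at position x of row a (k = a.toNat), as a Nat-indexed Int
def pvBit (k x : Nat) : Int := if (x / 2 ^ k) % 2 = 0 then 1 else 0

-- the integer value of the bits of row k over positions in l, onto accumulator c
def pvBitsum (k : Nat) (c : Int) (l : List Nat) : Int :=
  l.foldl (fun acc x => 2 * acc + pvBit k x) c

-- value after t shift-and-add doublings of v, first shift width W
def pvTile (v : Int) (W : Nat) : Nat → Int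
  | 0 => v
  | t + 1 => pvTile v W t * 2 ^ (W * 2 ^ t) + pvTile v W t

theorem pvFold_affine (g : Nat → Int) (l : List Nat) : ∀ (c : Int),
    l.foldl (fun acc x => 2 * acc + g x) c =
      c * 2 ^ l.length + l.foldl (fun acc x => 2 * acc + g x) 0 := by
  induction l with
  | nil => intro c; simp
  | cons x l ih =>
    intro c
    simp only [List.foldl_cons, List.length_cons]
    rw [ih, ih (2 * 0 + g x)]
    ring

theorem pvFold_const (g : Nat → Int) (b : Int) : ∀ (l : List Nat),
    (∀ x ∈ l, g x = b) → ∀ (c : Int),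
    l.foldl (fun acc x => 2 * acc + g x) c = c * 2 ^ l.length + b * (2 ^ l.length - 1) := by
  intro l
  induction l with
  | nil => intro _ c; simp
  | cons x l ih =>
    intro h c
    simp only [List.foldl_cons, List.length_cons]
    rw [ih (fun y hy => h y (List.mem_cons_of_mem _ hy)), h x List.mem_cons_self]
    ring

theorem pvBitsum_append (k : Nat) (c : Int) (l1 l2 : List Nat) :
    pvBitsum k c (l1 ++ l2) = pvBitsum k (pvBitsum k c l1) l2 := by
  unfold pvBitsum; rw [List.foldl_append]

theorem pvBitsum_affine (k : Nat) (c : Int) (l : List Nat) :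
    pvBitsum k c l = c * 2 ^ l.length + pvBitsum k 0 l :=
  pvFold_affine (pvBit k) l c

-- the bit pattern of row k has period 2^(k+1)
theorem pvBit_period (k s j : Nat) (hs : 2 ^ (k + 1) ∣ s) :
    pvBit k (s + j) = pvBit k j := by
  obtain ⟨c, rfl⟩ := hs
  unfold pvBit
  rw [show 2 ^ (k + 1) * c + j = 2 ^ k * (2 * c) + j by ring,
      Nat.mul_add_div (Nat.two_pow_pos k)]
  have h3 : (2 * c + j / 2 ^ k) % 2 = (j / 2 ^ k) % 2 := by omega
  rw [h3]

theorem pvBitsum_shift (k s : Nat) (hs : 2 ^ (k + 1) ∣ s) (c : Int) (l : List Nat) :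
    pvBitsum k c (l.map (fun x => s + x)) = pvBitsum k c l := by
  unfold pvBitsum
  rw [List.foldl_map]
  exact PySem.List.foldl_congr_mem _ _ _ _ (fun acc x _ => by rw [pvBit_period k s x hs])

-- one period is worth ((2^(2^k)) - 1) * 2^(2^k)
theorem pvBitsum_period (k : Nat) :
    pvBitsum k 0 (List.range (2 ^ (k + 1))) = ((2:Int) ^ 2 ^ k - 1) * 2 ^ 2 ^ k := by
  rw [show 2 ^ (k + 1) = 2 ^ k + 2 ^ k by ring, List.range_add, pvBitsum_append]
  have h1 : pvBitsum k 0 (List.range (2 ^ k)) = (2:Int) ^ 2 ^ k - 1 := by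
    have := pvFold_const (pvBit k) 1 (List.range (2 ^ k)) (fun x hx => by
      simp only [List.mem_range] at hx
      simp [pvBit, Nat.div_eq_of_lt hx]) 0
    simpa [pvBitsum] using this
  rw [h1]
  have h2 := pvFold_const (fun x => pvBit k (2 ^ k + x)) 0 (List.range (2 ^ k)) (fun x hx => by
    simp only [List.mem_range] at hx
    have hd : (2 ^ k + x) / 2 ^ k = 1 := by
      rw [show 2 ^ k + x = 2 ^ k * 1 + x by ring,
          Nat.mul_add_div (Nat.two_pow_pos k), Nat.div_eq_of_lt hx]
    simp [pvBit, hd]) ((2:Int) ^ 2 ^ k - 1)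
  unfold pvBitsum
  rw [List.foldl_map]
  simpa using h2

-- A's whole-row value is the doubling tile of one period
theorem pvBitsum_tile (k : Nat) (t : Nat) :
    pvBitsum k 0 (List.range (2 ^ t * 2 ^ (k + 1))) =
      pvTile (pvBitsum k 0 (List.range (2 ^ (k + 1)))) (2 ^ (k + 1)) t := by
  induction t with
  | zero => simp [pvTile]
  | succ t ih =>
    rw [show 2 ^ (t + 1) * 2 ^ (k + 1) = 2 ^ t * 2 ^ (k + 1) + 2 ^ t * 2 ^ (k + 1) by ring,
        List.range_add, pvBitsum_append, pvBitsum_shift k _ ⟨2 ^ t, by ring⟩,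
        pvBitsum_affine, List.length_range, ih,
        show 2 ^ t * 2 ^ (k + 1) = 2 ^ (k + 1) * 2 ^ t from Nat.mul_comm _ _]
    simp [pvTile]

-- B's doubling loop computes pvTile and doubles the width each step
theorem pvLoopB (v : Int) (W : Nat) (t : Nat) :
    (List.range t).foldl (fun (s : Int × Int) _ => (s.1 <<< s.2.toNat + s.1, 2 * s.2))
      (v, (W : Int)) = (pvTile v W t, ((W * 2 ^ t : Nat) : Int)) := by
  induction t with
  | zero => simp [pvTile]
  | succ t ih =>
    rw [List.range_succ, List.foldl_append, ih]
    simp only [List.foldl_cons, List.foldl_nil, pvTile]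
    congr 1
    · rw [Int.toNat_natCast, Int.shiftLeft_eq]
    · push_cast; ring

-- per-element equality of the two row computations
theorem pvRow_eq (n a : Int) (h0 : 0 ≤ a) (h1 : a < n) :
    pvIntBase2 (PySem.Str.join ""
      ((PySem.List.pyRange 0 ((2:Int) ^ n.toNat) 1).map
        (fun x =>
          if PySem.Int.mod (PySem.Int.floordiv x ((2:Int) ^ a.toNat)) 2 = 0 then "1" else "0"))) =
    (let p : Int := (2:Int) ^ a.toNat
     let row : Int := (((1:Int) <<< p.toNat) - 1) <<< p.toNat
     let st : Int × Int :=
       (List.range (n - a - 1).toNat).foldl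
         (fun (s : Int × Int) _ => (s.1 <<< s.2.toNat + s.1, 2 * s.2)) (row, 2 * p)
     st.1) := by
  have hk : a.toNat < n.toNat := by omega
  set k := a.toNat with hkdef
  set N := n.toNat with hNdef
  have hcast2N : (2:Int) ^ N = ((2 ^ N : Nat) : Int) := by push_cast; ring
  have hcast2k : (2:Int) ^ k = ((2 ^ k : Nat) : Int) := by push_cast; ring
  have hchars :
      (PySem.Str.join ""
        ((PySem.List.pyRange 0 ((2:Int) ^ N) 1).map
          (fun x =>
            if PySem.Int.mod (PySem.Int.floordiv x ((2:Int) ^ k)) 2 = 0 then "1" else "0"))).toList =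
      (PySem.List.pyRange 0 ((2:Int) ^ N) 1).map
        (fun x =>
          if PySem.Int.mod (PySem.Int.floordiv x ((2:Int) ^ k)) 2 = 0 then '1' else '0') := by
    rw [PySem.Str.toList_join, List.map_map]
    rw [show (String.toList ∘ fun x =>
        if PySem.Int.mod (PySem.Int.floordiv x ((2:Int) ^ k)) 2 = 0 then "1" else "0") =
        (fun c => [c]) ∘ (fun x =>
        if PySem.Int.mod (PySem.Int.floordiv x ((2:Int) ^ k)) 2 = 0 then '1' else '0') from
      funext (fun x => by
        show (if PySem.Int.mod (PySem.Int.floordiv x ((2:Int) ^ k)) 2 = 0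
            then "1" else "0").toList = _
        by_cases h : PySem.Int.mod (PySem.Int.floordiv x ((2:Int) ^ k)) 2 = 0
        · simp only [Function.comp_apply, if_pos h]; rfl
        · simp only [Function.comp_apply, if_neg h]; rfl)]
    rw [← List.map_map, show ("".toList : List Char) = [] from rfl,
        PySem.Chars.join_nil_singletons]
  have hLHS : pvIntBase2 (PySem.Str.join ""
      ((PySem.List.pyRange 0 ((2:Int) ^ N) 1).map
        (fun x =>
          if PySem.Int.mod (PySem.Int.floordiv x ((2:Int) ^ k)) 2 = 0 then "1" else "0"))) =
      pvBitsum k 0 (List.range (2 ^ N)) := by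
    unfold pvIntBase2
    rw [hchars, List.foldl_map, hcast2N, PySem.List.pyRange_zero_natCast, List.foldl_map]
    unfold pvBitsum
    apply PySem.List.foldl_congr_mem
    intro acc x _
    rw [hcast2k, PySem.Int.floordiv_natCast]
    rw [show PySem.Int.mod (((x / 2 ^ k : Nat) : Int)) 2 =
        (((x / 2 ^ k) % 2 : Nat) : Int) from PySem.Int.mod_natCast _ 2]
    by_cases h : (x / 2 ^ k) % 2 = 0
    · rw [if_pos (show (((x / 2 ^ k) % 2 : Nat) : Int) = 0 by exact_mod_cast h)]
      simp [pvBit, h]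
    · rw [if_neg (show ¬(((x / 2 ^ k) % 2 : Nat) : Int) = 0 by exact_mod_cast h)]
      simp [pvBit, h]
  rw [hLHS]
  show pvBitsum k 0 (List.range (2 ^ N)) =
    ((List.range (n - a - 1).toNat).foldl
      (fun (s : Int × Int) _ => (s.1 <<< s.2.toNat + s.1, 2 * s.2))
      ((((1:Int) <<< ((2:Int) ^ k).toNat) - 1) <<< ((2:Int) ^ k).toNat, 2 * ((2:Int) ^ k))).1
  rw [show ((2:Int) ^ k).toNat = 2 ^ k from by rw [hcast2k]; exact Int.toNat_natCast _]
  rw [show ((1:Int) <<< (2 ^ k : Nat) - 1) <<< (2 ^ k : Nat) =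
      ((2:Int) ^ 2 ^ k - 1) * 2 ^ 2 ^ k from by
    rw [Int.shiftLeft_eq, Int.shiftLeft_eq]; ring]
  rw [show 2 * ((2:Int) ^ k) = ((2 ^ (k + 1) : Nat) : Int) by push_cast; ring]
  rw [pvLoopB]
  rw [show (n - a - 1).toNat = N - k - 1 by omega]
  rw [show 2 ^ N = 2 ^ (N - k - 1) * 2 ^ (k + 1) by rw [← pow_add]; congr 1; omega]
  rw [pvBitsum_tile k (N - k - 1), pvBitsum_period k]

-- ===== VERDICT (by name: the statement is the Claim_ definition above) =====
theorem ident_spec : Claim_equal_ident := by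
  intro n _
  unfold Spec_ident ident ident_alt
  rw [PySem.List.foldl_append_singleton_eq_map, List.nil_append]
  apply List.map_congr_left
  intro a ha
  rw [PySem.List.mem_pyRange_one] at ha
  exact pvRow_eq n a ha.1 ha.2
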